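-- pv_equiv track=rewrite | github.com/noparkee/Problem-Solving | Codility/CommonPrimeDivisors.py | solution
-- ===== SOURCE A (Python) =====
-- def solution(A, B):
--     from math import gcd
--
--     answer = 0
--     for a, b in zip(A, B):
--         d = gcd(a, b)
--         d_a, d_b = 0, 0
--         while d_a != 1:
--             d_a = gcd(a, d)
--             a = a // d_a
--
--         while d_b != 1:
--             d_b = gcd(b, d)
--             b = b // d_b
--
--         if a == 1 and b == 1:
--             answer += 1
--
--     return answer
-- ===== SOURCE B (Python) =====
-- def solution(A, B):
--     def prime_divisors(n):
--         s = set()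
--         d = 2
--         while d * d <= n:
--             if n % d == 0:
--                 s.add(d)
--                 while n % d == 0:
--                     n //= d
--             d += 1
--         if n > 1:
--             s.add(n)
--         return s
--
--     answer = 0
--     for a, b in zip(A, B):
--         if a > 0 and b > 0 and prime_divisors(a) == prime_divisors(b):
--             answer += 1
--     return answer
-- ===== Notes on version B (the rewrite author's own statement) =====
-- stated objective: alternative
-- what changed: Replaces A's gcd-peeling loops (repeatedly dividing a and b by gcd(x,d) until it reaches 1) with explicit trial-division factorization: each number's set of prime divisors is computed once and the pair is counted iff the two sets are equal.
import Mathlib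
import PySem

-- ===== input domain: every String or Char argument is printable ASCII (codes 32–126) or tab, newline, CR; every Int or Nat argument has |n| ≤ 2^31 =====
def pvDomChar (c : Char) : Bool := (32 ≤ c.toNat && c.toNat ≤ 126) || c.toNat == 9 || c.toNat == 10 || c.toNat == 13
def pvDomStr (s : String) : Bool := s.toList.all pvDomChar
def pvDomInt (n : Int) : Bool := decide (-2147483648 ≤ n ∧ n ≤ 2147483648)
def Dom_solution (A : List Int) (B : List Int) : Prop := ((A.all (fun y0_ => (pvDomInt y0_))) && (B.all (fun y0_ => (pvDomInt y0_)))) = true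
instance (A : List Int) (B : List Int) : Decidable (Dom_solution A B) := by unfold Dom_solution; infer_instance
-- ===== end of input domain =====

-- B replaces A's gcd-peeling loops with trial-division prime-factor sets compared for equality (an alternative algorithm; return value only, no speed claim).

-- ===== PORT A =====
-- math.gcd
def pyGcd (a b : Int) : Int := (Int.gcd a b : Int)

-- the do-while body 'd_x = gcd(x, d); x = x // d_x' repeated while d_x != 1; fuel |x|+1 covers every terminating run
def peel (fuel : Nat) (a d : Int) : Int :=
  match fuel with
  | 0 => a
  | f+1 =>
    let da := pyGcd a d
    let a' := PySem.Int.floordiv a da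
    if da = 1 then a' else peel f a' d

def solution (A : List Int) (B : List Int) : Int :=
  (A.zip B).foldl (fun answer ab =>
    let d := pyGcd ab.1 ab.2
    let a' := peel (ab.1.natAbs + 1) ab.1 d
    let b' := peel (ab.2.natAbs + 1) ab.2 d
    if a' = 1 ∧ b' = 1 then answer + 1 else answer) 0

-- ===== PORT B =====
-- inner 'while n % d == 0: n //= d'; fuel |n|+1 covers every terminating run
def stripFac (fuel : Nat) (n d : Int) : Int :=
  match fuel with
  | 0 => n
  | f+1 => if PySem.Int.mod n d = 0 then stripFac f (PySem.Int.floordiv n d) d else n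

-- outer 'while d * d <= n' trial-division loop of prime_divisors; fuel |n|+2 covers every run (d grows each iteration)
def pdLoop (fuel : Nat) (s : PySem.Set Int) (d n : Int) : PySem.Set Int × Int :=
  match fuel with
  | 0 => (s, n)
  | f+1 =>
    if d * d ≤ n then
      if PySem.Int.mod n d = 0 then
        pdLoop f (PySem.Set.add s d) (d + 1) (stripFac (n.natAbs + 1) n d)
      else
        pdLoop f s (d + 1) n
    else (s, n)

def primeDivisors (n : Int) : PySem.Set Int :=
  let r := pdLoop (n.natAbs + 2) PySem.Set.empty 2 n
  if r.2 > 1 then PySem.Set.add r.1 r.2 else r.1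

def solution_alt (A : List Int) (B : List Int) : Int :=
  (A.zip B).foldl (fun answer ab =>
    if ab.1 > 0 && ab.2 > 0 && PySem.Set.equal (primeDivisors ab.1) (primeDivisors ab.2)
    then answer + 1 else answer) 0

-- ===== PRECONDITION & SPEC =====
-- Pre_ excludes exactly the aligned pairs on which A does not return: with a = 0 and |b| ≠ 1 (or symmetrically)
-- A raises ZeroDivisionError (both zero) or loops forever; Pre_ excludes nothing A returns on.
def Pre_solution (A : List Int) (B : List Int) : Prop :=
  ∀ p ∈ A.zip B, (p.1 = 0 → p.2.natAbs = 1) ∧ (p.2 = 0 → p.1.natAbs = 1)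
instance (A : List Int) (B : List Int) : Decidable (Pre_solution A B) := by unfold Pre_solution; infer_instance
def pvWitness_solution : List Int × List Int := ([2, 6, 15], [4, 12, 9])

def Spec_solution (A : List Int) (B : List Int) (out : Int) : Prop := out = solution_alt A B
instance (A : List Int) (B : List Int) (out : Int) : Decidable (Spec_solution A B out) := by unfold Spec_solution; infer_instance

-- ===== CLAIM (what is proved, stated in full; the proofs are below) =====
def Claim_equal_solution : Prop := ∀ (A : List Int) (B : List Int), Dom_solution A B → Pre_solution A B → Spec_solution A B (solution A B)

-- ===== LEMMAS AND PROOFS =====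

theorem floordiv_one (a : Int) : PySem.Int.floordiv a 1 = a := by
  rw [PySem.Int.floordiv_eq_ediv_of_pos (by norm_num)]; exact Int.ediv_one a

theorem pyGcd_natCast (m k : Nat) : pyGcd (m:Int) (k:Int) = (Nat.gcd m k : Int) := by
  simp [pyGcd, Int.gcd]

theorem peel_neg (fuel : Nat) (a d : Int) (ha : a < 0) : peel fuel a d < 0 := by
  induction fuel generalizing a with
  | zero => simpa [peel]
  | succ f ih =>
    simp only [peel]
    by_cases h1 : pyGcd a d = 1
    · simp only [h1, if_true]; rw [floordiv_one]; exact ha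
    · simp only [h1, if_false]
      apply ih
      have hg0 : Int.gcd a d ≠ 0 := by
        intro h; rw [Int.gcd_eq_zero_iff] at h; omega
      have hg2 : (2:Int) ≤ pyGcd a d := by
        simp only [pyGcd] at h1 ⊢
        have : Int.gcd a d ≠ 1 := by intro h; simp [h] at h1
        omega
      rw [PySem.Int.floordiv_eq_ediv_of_pos (by omega)]
      exact Int.ediv_neg_of_neg_of_pos ha (by omega)

theorem peel_eq_one_iff (d : Nat) (hd : 1 ≤ d) : ∀ (n : Nat), 1 ≤ n → ∀ (fuel : Nat), n + 1 ≤ fuel →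
    (peel fuel (n:Int) (d:Int) = 1 ↔ n.primeFactors ⊆ d.primeFactors) := by
  intro n
  induction n using Nat.strong_induction_on with
  | _ n ih =>
    intro hn fuel hf
    obtain ⟨f, rfl⟩ : ∃ f, fuel = f + 1 := ⟨fuel - 1, by omega⟩
    simp only [peel, pyGcd_natCast, PySem.Int.floordiv_natCast]
    have hgdvd : Nat.gcd n d ∣ n := Nat.gcd_dvd_left n d
    have hg1 : 1 ≤ Nat.gcd n d := Nat.pos_of_dvd_of_pos hgdvd (by omega)
    by_cases hcase : Nat.gcd n d = 1
    · simp only [hcase]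
      norm_num
      constructor
      · intro h1
        subst h1
        simp
      · intro hsub
        by_contra hne
        have h2 : 2 ≤ n := by omega
        obtain ⟨p, hp, hpn⟩ := Nat.exists_prime_and_dvd (by omega : n ≠ 1)
        have hpd : p ∣ d := by
          have := hsub (Nat.mem_primeFactors.mpr ⟨hp, hpn, by omega⟩)
          exact (Nat.mem_primeFactors.mp this).2.1
        have : p ∣ Nat.gcd n d := Nat.dvd_gcd hpn hpd
        rw [hcase] at this
        exact hp.one_lt.ne' (Nat.eq_one_of_dvd_one this ▸ rfl)
    · have hgcast : ((Nat.gcd n d : Int) = 1) ↔ False := by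
        simp [hcase]
      simp only [hgcast, if_false]
      have hg2 : 2 ≤ Nat.gcd n d := by omega
      have hq1 : 1 ≤ n / Nat.gcd n d := Nat.one_le_div_iff (by omega) |>.mpr (Nat.le_of_dvd (by omega) hgdvd)
      have hqlt : n / Nat.gcd n d < n := Nat.div_lt_self (by omega) (by omega)
      rw [ih _ hqlt hq1 f (by omega)]
      have hmul : (n / Nat.gcd n d) * Nat.gcd n d = n := Nat.div_mul_cancel hgdvd
      constructor
      · intro hsub
        have hpf : n.primeFactors = (n / Nat.gcd n d).primeFactors ∪ (Nat.gcd n d).primeFactors := by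
          conv_lhs => rw [← hmul]
          exact Nat.primeFactors_mul (by omega) (by omega)
        rw [hpf]
        apply Finset.union_subset hsub
        exact Nat.primeFactors_mono (Nat.gcd_dvd_right n d) (by omega)
      · intro hsub
        exact (Nat.primeFactors_mono (Nat.div_dvd_of_dvd hgdvd) (by omega)).trans hsub

theorem strip_spec (d : Nat) (hd : d.Prime) : ∀ (m : Nat), 1 ≤ m → ∀ (fuel : Nat), m ≤ fuel →
    ∃ r : Nat, stripFac fuel (m:Int) (d:Int) = (r:Int) ∧ 1 ≤ r ∧ r ∣ m ∧ ¬ d ∣ r ∧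
      r.primeFactors = m.primeFactors.erase d := by
  intro m
  induction m using Nat.strong_induction_on with
  | _ m ih =>
    intro hm fuel hf
    obtain ⟨f, rfl⟩ : ∃ f, fuel = f + 1 := ⟨fuel - 1, by omega⟩
    simp only [stripFac, PySem.Int.mod_natCast, PySem.Int.floordiv_natCast]
    by_cases hdvd : d ∣ m
    · have hmod : ((m % d : Nat) : Int) = 0 := by
        norm_cast
        omega
      rw [hmod, if_pos rfl]
      have hd2 := hd.two_le
      have hq1 : 1 ≤ m / d := Nat.one_le_div_iff (by omega) |>.mpr (Nat.le_of_dvd (by omega) hdvd)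
      have hqlt : m / d < m := Nat.div_lt_self (by omega) (by omega)
      obtain ⟨r, hr, hr1, hrdvd, hrnd, hrpf⟩ := ih _ hqlt hq1 f (by omega)
      refine ⟨r, hr, hr1, hrdvd.trans (Nat.div_dvd_of_dvd hdvd), hrnd, ?_⟩
      rw [hrpf]
      have hmul : (m / d) * d = m := Nat.div_mul_cancel hdvd
      have : m.primeFactors = (m / d).primeFactors ∪ d.primeFactors := by
        conv_lhs => rw [← hmul]
        exact Nat.primeFactors_mul (by omega) (by omega)
      rw [this, hd.primeFactors, Finset.erase_union_distrib, Finset.erase_singleton, Finset.union_empty]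
    · have hmod : ¬ ((m % d : Nat) : Int) = 0 := by
        norm_cast
        intro h
        exact hdvd (Nat.dvd_of_mod_eq_zero h)
      rw [if_neg hmod]
      refine ⟨m, rfl, hm, dvd_rfl, hdvd, ?_⟩
      rw [Finset.erase_eq_of_notMem]
      intro h
      exact hdvd (Nat.mem_primeFactors.mp h).2.1

theorem loop_end (d m : Nat) (h1 : 1 ≤ m)
    (hfac : ∀ p : Nat, p.Prime → p ∣ m → d ≤ p) (hlt : m < d * d) : m = 1 ∨ m.Prime := by
  by_cases hm1 : m = 1
  · left; exact hm1
  · right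
    obtain ⟨p, hp, hpm⟩ := Nat.exists_prime_and_dvd hm1
    have hdp : d ≤ p := hfac p hp hpm
    have ht : m / p = 1 := by
      by_contra hne
      have ht1 : 1 ≤ m / p := Nat.one_le_div_iff hp.pos |>.mpr (Nat.le_of_dvd (by omega) hpm)
      obtain ⟨q, hq, hqt⟩ := Nat.exists_prime_and_dvd (by omega : m / p ≠ 1)
      have hqm : q ∣ m := hqt.trans (Nat.div_dvd_of_dvd hpm)
      have hdq : d ≤ q := hfac q hq hqm
      have hqle : q ≤ m / p := Nat.le_of_dvd (by omega) hqt
      have hmul : (m / p) * p = m := Nat.div_mul_cancel hpm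
      nlinarith
    have : p = m := by
      have hmul : (m / p) * p = m := Nat.div_mul_cancel hpm
      rw [ht, one_mul] at hmul
      exact hmul
    rwa [this] at hp

theorem tail_mem (s : PySem.Set Int) (m : Nat) (x : Int) (hm : m = 1 ∨ m.Prime) :
    (x ∈ (if ((m:Int)) > 1 then PySem.Set.add s (m:Int) else s) ↔
      x ∈ s ∨ ∃ p ∈ m.primeFactors, x = (p:Int)) := by
  rcases hm with rfl | hp
  · norm_num
  · have h2 := hp.two_le
    rw [if_pos (by exact_mod_cast h2), PySem.Set.mem_add, hp.primeFactors]
    simp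

theorem pdLoop_mem (x : Int) : ∀ (fuel : Nat) (s : PySem.Set Int) (d m : Nat), 2 ≤ d → 1 ≤ m →
    (∀ p : Nat, p.Prime → p ∣ m → d ≤ p) → m + 2 ≤ fuel + d →
    (x ∈ (if (pdLoop fuel s (d:Int) (m:Int)).2 > 1 then
            PySem.Set.add (pdLoop fuel s (d:Int) (m:Int)).1 (pdLoop fuel s (d:Int) (m:Int)).2
          else (pdLoop fuel s (d:Int) (m:Int)).1) ↔
      x ∈ s ∨ ∃ p ∈ m.primeFactors, x = (p:Int)) := by
  intro fuel
  induction fuel with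
  | zero =>
    intro s d m hd hm hfac hfuel
    simp only [pdLoop]
    exact tail_mem s m x (loop_end d m hm hfac (by nlinarith))
  | succ f ih =>
    intro s d m hd hm hfac hfuel
    simp only [pdLoop]
    by_cases hguard : (d:Int) * (d:Int) ≤ (m:Int)
    · rw [if_pos hguard]
      have hguardN : d * d ≤ m := by exact_mod_cast hguard
      rw [PySem.Int.mod_natCast]
      by_cases hdvd : d ∣ m
      · have hmod : ((m % d : Nat) : Int) = 0 := by norm_cast; omega
        rw [if_pos hmod]
        -- d is prime: its least prime divisor divides m, hence is ≥ d
        have hdprime : d.Prime := by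
          obtain ⟨q, hq, hqd⟩ := Nat.exists_prime_and_dvd (by omega : d ≠ 1)
          have hqm : q ∣ m := hqd.trans hdvd
          have : d ≤ q := hfac q hq hqm
          have : q = d := le_antisymm (Nat.le_of_dvd (by omega) hqd) this
          rwa [← this]
        have hnatAbs : ((m:Int)).natAbs + 1 = m + 1 := by simp
        rw [hnatAbs]
        obtain ⟨r, hr, hr1, hrdvd, hrnd, hrpf⟩ := strip_spec d hdprime m hm (m+1) (by omega)
        rw [hr]
        have hcast : ((d:Int) + 1) = ((d+1 : Nat) : Int) := by push_cast; ring
        rw [hcast]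
        rw [ih (PySem.Set.add s (d:Int)) (d+1) r (by omega) hr1
            (by
              intro p hp hpr
              have hpm : p ∣ m := hpr.trans hrdvd
              have : d ≤ p := hfac p hp hpm
              have : p ≠ d := by rintro rfl; exact hrnd hpr
              omega)
            (by have : r ≤ m := Nat.le_of_dvd (by omega) hrdvd; omega)]
        have hdm : d ∈ m.primeFactors := Nat.mem_primeFactors.mpr ⟨hdprime, hdvd, by omega⟩
        have hpfm : m.primeFactors = insert d r.primeFactors := by
          rw [hrpf, Finset.insert_erase hdm]
        rw [PySem.Set.mem_add, hpfm]
        simp only [Finset.mem_insert]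
        constructor
        · rintro ((hs | rfl) | ⟨p, hp, rfl⟩)
          · exact Or.inl hs
          · exact Or.inr ⟨d, Or.inl rfl, rfl⟩
          · exact Or.inr ⟨p, Or.inr hp, rfl⟩
        · rintro (hs | ⟨p, (rfl | hp), rfl⟩)
          · exact Or.inl (Or.inl hs)
          · exact Or.inl (Or.inr rfl)
          · exact Or.inr ⟨p, hp, rfl⟩
      · have hmod : ¬ ((m % d : Nat) : Int) = 0 := by
          norm_cast
          intro h
          exact hdvd (Nat.dvd_of_mod_eq_zero h)
        rw [if_neg hmod]
        have hcast : ((d:Int) + 1) = ((d+1 : Nat) : Int) := by push_cast; ring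
        rw [hcast]
        exact ih s (d+1) m (by omega) hm
          (by
            intro p hp hpm
            have : d ≤ p := hfac p hp hpm
            have : p ≠ d := by rintro rfl; exact hdvd hpm
            omega)
          (by omega)
    · rw [if_neg hguard]
      have : m < d * d := by
        have : ¬ (d * d ≤ m) := by exact_mod_cast hguard
        omega
      exact tail_mem s m x (loop_end d m hm hfac this)

theorem primeDivisors_mem (n : Nat) (hn : 1 ≤ n) (x : Int) :
    x ∈ primeDivisors (n:Int) ↔ ∃ p ∈ n.primeFactors, x = (p:Int) := by
  have hnat : ((n:Int)).natAbs + 2 = n + 2 := by simp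
  simp only [primeDivisors, hnat]
  have h2 : ((2:Nat):Int) = (2:Int) := by norm_num
  rw [← h2]
  rw [pdLoop_mem x (n+2) PySem.Set.empty 2 n (by omega) hn (fun p hp _ => hp.two_le) (by omega)]
  simp [PySem.Set.empty]

theorem equal_primeDivisors (a b : Nat) (ha : 1 ≤ a) (hb : 1 ≤ b) :
    (PySem.Set.equal (primeDivisors (a:Int)) (primeDivisors (b:Int)) = true) ↔
      a.primeFactors = b.primeFactors := by
  rw [PySem.Set.equal_iff]
  constructor
  · intro h
    ext p
    have hp := h (p:Int)
    rw [primeDivisors_mem a ha, primeDivisors_mem b hb] at hp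
    constructor
    · intro hpa
      obtain ⟨q, hq, hqe⟩ := hp.mp ⟨p, hpa, rfl⟩
      rwa [Nat.cast_inj.mp hqe]
    · intro hpb
      obtain ⟨q, hq, hqe⟩ := hp.mpr ⟨p, hpb, rfl⟩
      rwa [Nat.cast_inj.mp hqe]
  · intro h x
    rw [primeDivisors_mem a ha, primeDivisors_mem b hb, h]

theorem peel_zero_one : peel 1 0 1 = 0 := by decide

theorem pyGcd_zero_right (a : Int) : pyGcd a 0 = (a.natAbs : Int) := by
  simp [pyGcd, Int.gcd]

theorem pyGcd_zero_left (b : Int) : pyGcd 0 b = (b.natAbs : Int) := by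
  simp [pyGcd, Int.gcd]

theorem pair_cond (a b : Int) (h0a : a = 0 → b.natAbs = 1) (h0b : b = 0 → a.natAbs = 1) :
    ((peel (a.natAbs + 1) a (pyGcd a b) = 1 ∧ peel (b.natAbs + 1) b (pyGcd a b) = 1) ↔
     (decide (a > 0) && decide (b > 0) && PySem.Set.equal (primeDivisors a) (primeDivisors b)) = true) := by
  rcases lt_trichotomy a 0 with hA | hA | hA
  · have hfalse : decide (a > 0) = false := by simp; omega
    rw [hfalse]
    simp only [Bool.false_and, Bool.false_eq_true, iff_false]
    intro ⟨h1, _⟩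
    have := peel_neg (a.natAbs + 1) a (pyGcd a b) hA
    omega
  · subst hA
    have hb1 : b.natAbs = 1 := h0a rfl
    rw [pyGcd_zero_left, hb1]
    simp only [Int.natAbs_zero, Nat.cast_one, zero_add, peel_zero_one]
    simp
  · rcases lt_trichotomy b 0 with hB | hB | hB
    · have hfalse : decide (b > 0) = false := by simp; omega
      rw [hfalse]
      simp only [Bool.and_false, Bool.false_and, Bool.false_eq_true, iff_false]
      intro ⟨_, h2⟩
      have := peel_neg (b.natAbs + 1) b (pyGcd a b) hB
      omega
    · subst hB
      have ha1 : a.natAbs = 1 := h0b rfl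
      have ha : a = 1 := by omega
      subst ha
      rw [pyGcd_zero_right]
      simp only [Int.natAbs_zero, Int.natAbs_one, Nat.cast_one, zero_add, peel_zero_one]
      simp
    · -- both positive
      obtain ⟨na, rfl⟩ : ∃ na : Nat, a = (na : Int) := ⟨a.toNat, by omega⟩
      obtain ⟨nb, rfl⟩ : ∃ nb : Nat, b = (nb : Int) := ⟨b.toNat, by omega⟩
      have hna : 1 ≤ na := by exact_mod_cast hA
      have hnb : 1 ≤ nb := by exact_mod_cast hB
      have hgcd1 : 1 ≤ Nat.gcd na nb := Nat.pos_of_dvd_of_pos (Nat.gcd_dvd_left na nb) (by omega)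
      rw [pyGcd_natCast]
      have hfa : ((na:Int)).natAbs + 1 = na + 1 := by simp
      have hfb : ((nb:Int)).natAbs + 1 = nb + 1 := by simp
      rw [hfa, hfb,
        peel_eq_one_iff (Nat.gcd na nb) hgcd1 na hna (na+1) le_rfl,
        peel_eq_one_iff (Nat.gcd na nb) hgcd1 nb hnb (nb+1) le_rfl]
      have h1 : decide ((na:Int) > 0) = true := by simp; exact_mod_cast hA
      have h2 : decide ((nb:Int) > 0) = true := by simp; exact_mod_cast hB
      rw [h1, h2, Bool.true_and, Bool.true_and,
        equal_primeDivisors na nb hna hnb, Nat.primeFactors_gcd (by omega) (by omega)]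
      constructor
      · rintro ⟨ha, hb⟩
        ext p
        constructor
        · intro hp; exact (Finset.mem_inter.mp (ha hp)).2
        · intro hp; exact (Finset.mem_inter.mp (hb hp)).1
      · intro h
        rw [h]
        exact ⟨fun p hp => Finset.mem_inter.mpr ⟨h ▸ hp, hp⟩,
               fun p hp => Finset.mem_inter.mpr ⟨h ▸ hp, hp⟩⟩

-- ===== VERDICT (by name: the statement is the Claim_ definition above) =====
theorem solution_spec : Claim_equal_solution := by
  intro A B _ hpre
  show solution A B = solution_alt A B
  unfold solution solution_alt
  apply PySem.List.foldl_congr_mem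
  intro acc p hp
  obtain ⟨h0a, h0b⟩ := hpre p hp
  simp only []
  exact if_congr (pair_cond p.1 p.2 h0a h0b) rfl rfl
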